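-- pv_equiv track=rewrite | github.com/ANever/sib-pinn | utils.py | find_all_words
-- ===== SOURCE A (Python) =====
-- def find_all_words(string):
--     _len = len(string)
--     list_of_words = []
--     start = 0
--     while start < _len:
--         for end in range(start + 1, _len + 1):
--             if end == _len:
--                 list_of_words.append((start, string[start:end]))
--                 start = _len
--                 break
--             elif not string[start:end].isidentifier():
--                 list_of_words.append((start, string[start : end - 1]))
--                 start = end
--                 break
--     return list_of_words
-- ===== SOURCE B (Python) =====
-- def find_all_words(string):
--     n = len(string)
--     words = []
--     i = 0
--     while i < n:
--         j = i
--         if string[j].isalpha() or string[j] == '_':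
--             j += 1
--             while j < n and (string[j].isalnum() or string[j] == '_'):
--                 j += 1
--         words.append((i, string[i:j]))
--         i = j + 1
--     return words
-- ===== Notes on version B (the rewrite author's own statement) =====
-- stated objective: faster
-- what changed: Replaced A's restart-from-scratch inner loop that re-tests string[start:end].isidentifier() on ever-longer slices with a single linear scan that classifies each character once as identifier-start/continue and reads each word's extent directly.
-- intended difference: On nonempty strings none of whose suffixes is an identifier, A's end-of-string branch preempts the failing identifier test and so absorbs the trailing non-identifier character into the last word (A('ab!') = [(0,'ab!')]), while B ends the last word at the end of its identifier run (B('ab!') = [(0,'ab')]), which is the intended tokenization. — e.g. on find_all_words("ab!"): A returns [(0, "ab!")], B returns [(0, "ab")]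
import Mathlib
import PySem

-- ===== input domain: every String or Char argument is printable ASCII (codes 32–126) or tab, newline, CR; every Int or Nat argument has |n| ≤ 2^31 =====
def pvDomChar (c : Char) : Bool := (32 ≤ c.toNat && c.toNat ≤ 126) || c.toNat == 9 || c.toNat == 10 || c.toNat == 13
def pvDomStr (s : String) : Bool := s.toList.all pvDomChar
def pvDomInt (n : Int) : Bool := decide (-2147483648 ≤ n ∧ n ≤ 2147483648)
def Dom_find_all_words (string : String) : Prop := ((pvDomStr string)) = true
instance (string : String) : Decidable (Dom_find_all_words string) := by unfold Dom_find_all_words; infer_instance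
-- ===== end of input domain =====

-- B replaces A's quadratic rescan (isidentifier on every prefix slice) by one linear pass; objective: faster.
-- On strings with no identifier suffix, A's end-of-string branch absorbs the trailing separator into the last word; B returns the word without it (see D_ below).

-- ===== PORT A =====
-- Python identifier-start / identifier-continue characters; exact on the ASCII domain.
def pvIdentStart (c : Char) : Bool := c.isAlpha || c == '_'
def pvIdentCont (c : Char) : Bool := c.isAlphanum || c == '_'
-- s.isidentifier() : nonempty, first char a start char, rest continue chars; exact on ASCII.
def pvIsIdentifier (l : List Char) : Bool :=
  match l with
  | [] => false
  | c :: r => pvIdentStart c && r.all pvIdentCont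

-- string[a:b] for 0 ≤ a ≤ b ≤ len (the only shape A uses); exact there.
def pvSlice (l : List Char) (a b : Nat) : List Char := (l.drop a).take (b - a)

-- the inner `for end in range(start+1, _len+1)` loop: returns the appended token and the new `start`
def findA_inner (s : List Char) (n start endv fuel : Nat) : (Int × String) × Nat :=
  match fuel with
  | 0 => (((start : Int), ""), n)  -- unreachable: the for-loop always breaks at end = _len
  | fuel + 1 =>
    if endv = n then (((start : Int), String.ofList (pvSlice s start endv)), n)
    else if !(pvIsIdentifier (pvSlice s start endv)) then
      (((start : Int), String.ofList (pvSlice s start (endv - 1))), endv)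
    else findA_inner s n start (endv + 1) fuel

-- the outer `while start < _len` loop
def findA_outer (s : List Char) (n start fuel : Nat) : List (Int × String) :=
  match fuel with
  | 0 => []
  | fuel + 1 =>
    if start < n then
      let r := findA_inner s n start (start + 1) (n - start)
      r.1 :: findA_outer s n r.2 fuel
    else []

def find_all_words (string : String) : List (Int × String) :=
  findA_outer string.toList string.toList.length 0 string.toList.length

-- ===== PORT B =====
-- B's inner `while j < n and <continue char>` counter: leading continue-run of the suffix
-- (dropping past the end yields [] so the j < n bound is exact)
def pvContRun (l : List Char) : Nat :=
  match l with
  | [] => 0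
  | c :: r => if pvIdentCont c then pvContRun r + 1 else 0

-- B's outer `while i < n` loop; j is the end of the identifier run starting at i
def findB_go (s : List Char) (n i fuel : Nat) : List (Int × String) :=
  match fuel with
  | 0 => []
  | fuel + 1 =>
    if i < n then
      let j := if pvIdentStart (s.getD i ' ') then i + 1 + pvContRun (s.drop (i + 1)) else i
      ((i : Int), String.ofList ((s.drop i).take (j - i))) :: findB_go s n (j + 1) fuel
    else []

def find_all_words_alt (string : String) : List (Int × String) :=
  findB_go string.toList string.toList.length 0 string.toList.length

-- ===== PRECONDITION & SPEC =====
-- s[p:] is an identifier (start char at p, continue chars after); Bool so D_ is decidable by unfolding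
def pvSuffIdent (s : List Char) (p : Nat) : Bool :=
  pvIdentStart (s.getD p ' ') && (s.drop (p + 1)).all pvIdentCont

-- On nonempty strings none of whose suffixes is an identifier, A's final pair absorbs the trailing
-- non-identifier character (the end-of-string branch preempts the failing identifier test), e.g.
-- A "ab!" = [(0,"ab!")]; B returns the word without that separator, [(0,"ab")], the intended tokenization.
def D_find_all_words (string : String) : Prop :=
  string.toList ≠ [] ∧ ∀ p, p < string.toList.length → pvSuffIdent string.toList p = false
instance (string : String) : Decidable (D_find_all_words string) := by unfold D_find_all_words; infer_instance

def Spec_find_all_words (string : String) (out : List (Int × String)) : Prop := ¬ D_find_all_words string → out = find_all_words_alt string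
instance (string : String) (out : List (Int × String)) : Decidable (Spec_find_all_words string out) := by unfold Spec_find_all_words; infer_instance

def pvDiffWitness_find_all_words : String := "ab!"
def pvDiffWitnessOut_find_all_words : (List (Int × String)) × (List (Int × String)) :=
  ([(0, "ab!")], [(0, "ab")])

-- ===== CLAIM (what is proved, stated in full; the proofs are below) =====
def Claim_unchanged_find_all_words : Prop := ∀ (string : String), Dom_find_all_words string → Spec_find_all_words string (find_all_words string)
def Claim_changed_find_all_words : Prop := Dom_find_all_words (pvDiffWitness_find_all_words) ∧ D_find_all_words (pvDiffWitness_find_all_words) ∧ find_all_words (pvDiffWitness_find_all_words) = pvDiffWitnessOut_find_all_words.1 ∧ find_all_words_alt (pvDiffWitness_find_all_words) = pvDiffWitnessOut_find_all_words.2 ∧ pvDiffWitnessOut_find_all_words.1 ≠ pvDiffWitnessOut_find_all_words.2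
def Claim_exact_find_all_words : Prop := ∀ (string : String), Dom_find_all_words string → D_find_all_words string → find_all_words string ≠ find_all_words_alt string

-- ===== LEMMAS AND PROOFS =====

lemma contRun_take (l : List Char) (j : Nat) (hj : j ≤ l.length) :
    (l.take j).all pvIdentCont = decide (j ≤ pvContRun l) := by
  induction l generalizing j with
  | nil =>
    simp only [List.length_nil, Nat.le_zero] at hj
    subst hj
    simp [pvContRun]
  | cons c r ih =>
    cases j with
    | zero => simp
    | succ j =>
      simp only [List.take_succ_cons, List.all_cons, pvContRun]
      by_cases hc : pvIdentCont c
      · rw [ih j (by simpa using hj)]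
        simp only [hc, Bool.true_and, reduceIte, decide_eq_decide]
        omega
      · simp [hc]

lemma contRun_le_length (l : List Char) : pvContRun l ≤ l.length := by
  induction l with
  | nil => simp [pvContRun]
  | cons c r ih =>
    simp only [pvContRun, List.length_cons]
    split <;> omega

lemma contRun_all (l : List Char) (h : l.all pvIdentCont = true) : pvContRun l = l.length := by
  have := contRun_take l l.length (le_refl _)
  rw [List.take_length] at this
  rw [this] at h
  have := contRun_le_length l
  simp at h
  omega

lemma contRun_stop (l : List Char) (h : pvContRun l < l.length) :
    pvIdentCont (l.getD (pvContRun l) ' ') = false := by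
  induction l with
  | nil => simp at h
  | cons c r ih =>
    by_cases hc : pvIdentCont c
    · simp only [pvContRun, hc, if_true] at h ⊢
      simp only [List.length_cons] at h
      exact ih (by omega)
    · simp only [pvContRun, hc] at h ⊢
      simpa using hc

lemma start_imp_cont (c : Char) (h : pvIdentStart c = true) : pvIdentCont c = true := by
  unfold pvIdentStart at h
  unfold pvIdentCont
  rcases Bool.or_eq_true_iff.mp h with h | h
  · simp [Char.isAlphanum, h]
  · simp [h]

-- characterisation of A's inner scan in terms of B's run length m
lemma inner_char (s : List Char) (n start m : Nat) (hn : n = s.length) (hstart : start < n)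
    (hm : m = if pvIdentStart (s.getD start ' ') then 1 + pvContRun (s.drop (start + 1)) else 0) :
    ∀ fuel j, j ≤ m → start + 1 + j ≤ n → n - (start + 1 + j) < fuel →
    findA_inner s n start (start + 1 + j) fuel =
      if n ≤ start + m + 1 then (((start : Int), String.ofList ((s.drop start).take (n - start))), n)
      else (((start : Int), String.ofList ((s.drop start).take m)), start + m + 1) := by
  have hdrop : s.drop start = s[start]'(by omega) :: s.drop (start + 1) :=
    List.drop_eq_getElem_cons (by omega)
  have hget : s.getD start ' ' = s[start]'(by omega) := List.getD_eq_getElem s ' ' (by omega)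
  -- identifier test on a prefix of length j+1 ↔ j+1 ≤ m
  have hident : ∀ k, 1 ≤ k → start + k ≤ n →
      pvIsIdentifier ((s.drop start).take k) = decide (k ≤ m) := by
    intro k hk1 hkn
    obtain ⟨k', rfl⟩ : ∃ k', k = k' + 1 := ⟨k - 1, by omega⟩
    rw [hdrop]
    simp only [List.take_succ_cons, pvIsIdentifier]
    rw [contRun_take (s.drop (start + 1)) k' (by simp; omega)]
    rw [hm, hget]
    by_cases hs : pvIdentStart (s[start]'(by omega))
    · simp only [hs, Bool.true_and, reduceIte, decide_eq_decide]
      omega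
    · simp [hs]
  intro fuel
  induction fuel with
  | zero => intro j _ _ hf; omega
  | succ fuel ih =>
    intro j hjm hjn hf
    by_cases hend : start + 1 + j = n
    · -- end == _len: the whole rest is appended
      simp only [findA_inner, hend, reduceIte]
      have : n ≤ start + m + 1 := by omega
      rw [if_pos this]
      congr 2
    · have hlt : start + 1 + j < n := by omega
      have hsl : pvSlice s start (start + 1 + j) = (s.drop start).take (j + 1) := by
        simp [pvSlice]; congr 1; omega
      simp only [findA_inner, if_neg hend, hsl,
        hident (j + 1) (by omega) (by omega)]
      by_cases hjm' : j + 1 ≤ m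
      · -- prefix still an identifier: continue the scan
        simp only [decide_eq_true hjm', Bool.not_true, Bool.false_eq_true, if_false]
        have : start + 1 + j + 1 = start + 1 + (j + 1) := by omega
        rw [this]
        refine ih (j + 1) hjm' ?_ ?_ <;> omega
      · -- first failing prefix: j = m, emit string[start:end-1] and set start = end
        have hj : j = m := by omega
        simp only [decide_eq_false hjm', Bool.not_false, if_true]
        rw [if_neg (by omega)]
        subst hj
        have e1 : start + j + 1 - 1 - start = j := by omega
        have e2 : start + 1 + j = start + j + 1 := by omega
        simp only [pvSlice, e2, e1]

lemma outerA_at_end (s : List Char) (n fuel : Nat) : findA_outer s n n fuel = [] := by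
  cases fuel <;> simp [findA_outer]

lemma goB_at_end (s : List Char) (n i fuel : Nat) (h : ¬ i < n) : findB_go s n i fuel = [] := by
  cases fuel <;> simp [findB_go, h]

-- the step dichotomy: from a live identifier suffix at p ≥ i, either the run at i covers the whole
-- rest of the string, or the separator it stops at is strictly before position n-1 (no swallowing)
lemma step_cases (s : List Char) (n i p : Nat) (hn : n = s.length) (hip : i ≤ p) (hpn : p < n)
    (hsuff : pvSuffIdent s p = true)
    (m : Nat) (hm : m = if pvIdentStart (s.getD i ' ') then 1 + pvContRun (s.drop (i + 1)) else 0) :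
    i + m = n ∨ (i + m < p ∧ i + m + 1 < n) := by
  have hmn : i + m ≤ n := by
    have := contRun_le_length (s.drop (i + 1))
    simp only [List.length_drop] at this
    rw [hm]; split <;> omega
  unfold pvSuffIdent at hsuff
  rcases Bool.and_eq_true_iff.mp hsuff with ⟨hstartp, hcontp⟩
  by_cases hpi : p = i
  · -- the suffix starts at i itself: the run covers everything to n
    subst hpi
    rw [hstartp] at hm
    simp only [reduceIte] at hm
    rw [contRun_all _ hcontp] at hm
    simp only [List.length_drop] at hm
    left; omega
  · have hip' : i < p := by omega
    -- show i + m < p; otherwise s[i+m] would be both a continue char and the stopping char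
    by_cases hlt : i + m < p
    · right; exact ⟨hlt, by omega⟩
    · -- i + m ≥ p > i, so m ≥ 1 and the start branch was taken
      have hm1 : 1 ≤ m := by omega
      have hstart_i : pvIdentStart (s.getD i ' ') = true := by
        by_contra hc
        rw [Bool.not_eq_true] at hc
        rw [hm, hc] at hm1
        simp at hm1
      rw [hstart_i] at hm
      simp only [reduceIte] at hm
      by_cases hend : i + m = n
      · left; exact hend
      · exfalso
        -- s[i+m] is a continue char (it is at or after p), contradicting contRun_stop
        have hcn : i + m < n := by omega
        have hstop : pvIdentCont ((s.drop (i + 1)).getD (pvContRun (s.drop (i + 1))) ' ') = false := by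
          apply contRun_stop
          simp only [List.length_drop]
          omega
        have hidx : (s.drop (i + 1)).getD (pvContRun (s.drop (i + 1))) ' ' = s.getD (i + m) ' ' := by
          have h1 : i + 1 + pvContRun (s.drop (i + 1)) = i + m := by omega
          rw [List.getD_eq_getElem _ _ (by simp only [List.length_drop]; omega),
              List.getD_eq_getElem _ _ (by omega)]
          simp only [List.getElem_drop]
          congr 1
        have hcont_im : pvIdentCont (s.getD (i + m) ' ') = true := by
          by_cases him : i + m = p
          · rw [him]; exact start_imp_cont _ hstartp
          · have : p < i + m := by omega
            have hidx2 : (s.drop (p + 1)).getD (i + m - (p + 1)) ' ' = s.getD (i + m) ' ' := by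
              rw [List.getD_eq_getElem _ _ (by simp only [List.length_drop]; omega),
                  List.getD_eq_getElem _ _ (by omega)]
              simp only [List.getElem_drop]
              congr 1
              omega
            rw [← hidx2]
            have := List.all_eq_true.mp hcontp ((s.drop (p + 1)).getD (i + m - (p + 1)) ' ')
            apply this
            rw [List.getD_eq_getElem _ _ (by simp only [List.length_drop]; omega)]
            exact List.getElem_mem _
        rw [hidx] at hstop
        rw [hcont_im] at hstop
        simp at hstop

-- A's outer loop equals B's loop as long as some identifier suffix lies at or after the current start
lemma outer_eq (s : List Char) (n : Nat) (hn : n = s.length) :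
    ∀ fuel1 fuel2 i, (∃ p, i ≤ p ∧ p < n ∧ pvSuffIdent s p = true) →
    n - i ≤ fuel1 → n - i ≤ fuel2 →
    findA_outer s n i fuel1 = findB_go s n i fuel2 := by
  intro fuel1
  induction fuel1 with
  | zero =>
    intro fuel2 i hinv h1 _
    obtain ⟨p, hip, hpn, _⟩ := hinv
    omega
  | succ fuel1 ih =>
    intro fuel2 i hinv h1 h2
    obtain ⟨p, hip, hpn, hsuff⟩ := hinv
    have hs : i < n := by omega
    obtain ⟨fuel2', rfl⟩ : ∃ k, fuel2 = k + 1 := ⟨fuel2 - 1, by omega⟩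
    set m := if pvIdentStart (s.getD i ' ') then 1 + pvContRun (s.drop (i + 1)) else 0 with hm
    have hinner := inner_char s n i m hn hs hm (n - i) 0 (by omega) (by omega) (by omega)
    simp only [Nat.add_zero] at hinner
    have hj : (if pvIdentStart (s.getD i ' ') then i + 1 + pvContRun (s.drop (i + 1)) else i) = i + m := by
      rw [hm]; split <;> omega
    rcases step_cases s n i p hn hip hpn hsuff m hm with hfull | ⟨hlt, hlt1⟩
    · -- run to the end: A swallows nothing extra (the whole tail IS the run), B emits the same and stops
      simp only [findA_outer, findB_go, if_pos hs, hj]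
      rw [hinner, if_pos (by omega)]
      have e : i + m - i = n - i := by omega
      rw [e, outerA_at_end, goB_at_end s n (i + m + 1) fuel2' (by omega)]
    · -- ordinary token: equal heads, recurse past the separator
      simp only [findA_outer, findB_go, if_pos hs, hj]
      rw [hinner, if_neg (by omega)]
      have e : i + m - i = m := by omega
      rw [e]
      refine congrArg _ (ih fuel2' (i + m + 1) ⟨p, by omega, hpn, hsuff⟩ (by omega) (by omega))

-- converse of contRun_all
lemma all_of_contRun_full (l : List Char) (h : pvContRun l = l.length) :
    l.all pvIdentCont = true := by
  have := contRun_take l l.length (le_refl _)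
  rw [List.take_length] at this
  rw [this, h]
  simp

-- with no identifier suffix at or after i, the two loops always differ (A swallows the last separator)
lemma outer_ne (s : List Char) (n : Nat) (hn : n = s.length) :
    ∀ fuel1 fuel2 i, i < n → (∀ p, i ≤ p → p < n → pvSuffIdent s p = false) →
    n - i ≤ fuel1 → n - i ≤ fuel2 →
    findA_outer s n i fuel1 ≠ findB_go s n i fuel2 := by
  intro fuel1
  induction fuel1 with
  | zero => intro fuel2 i hs _ h1 _; omega
  | succ fuel1 ih =>
    intro fuel2 i hs hnone h1 h2
    obtain ⟨fuel2', rfl⟩ : ∃ k, fuel2 = k + 1 := ⟨fuel2 - 1, by omega⟩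
    set m := if pvIdentStart (s.getD i ' ') then 1 + pvContRun (s.drop (i + 1)) else 0 with hm
    have hmn : i + m ≤ n := by
      have := contRun_le_length (s.drop (i + 1))
      simp only [List.length_drop] at this
      rw [hm]; split <;> omega
    have hinner := inner_char s n i m hn hs hm (n - i) 0 (by omega) (by omega) (by omega)
    simp only [Nat.add_zero] at hinner
    have hj : (if pvIdentStart (s.getD i ' ') then i + 1 + pvContRun (s.drop (i + 1)) else i) = i + m := by
      rw [hm]; split <;> omega
    -- the run cannot reach n: that would make s[i:] an identifier suffix
    have hno_full : i + m ≠ n := by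
      intro hfull
      have hm1 : 1 ≤ m := by omega
      have hstart_i : pvIdentStart (s.getD i ' ') = true := by
        by_contra hc
        rw [Bool.not_eq_true] at hc
        rw [hc] at hm
        simp at hm
        omega
      rw [hstart_i] at hm
      simp only [reduceIte] at hm
      have hall : (s.drop (i + 1)).all pvIdentCont = true := by
        apply all_of_contRun_full
        simp only [List.length_drop]
        omega
      have : pvSuffIdent s i = true := by
        unfold pvSuffIdent
        rw [hstart_i, hall]
        rfl
      rw [hnone i (le_refl _) hs] at this
      exact absurd this (by simp)
    by_cases hsw : i + m + 1 = n
    · -- the separator is the last character: A swallows it, B does not — final tokens differ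
      simp only [findA_outer, findB_go, if_pos hs, hj]
      rw [hinner, if_pos (by omega)]
      rw [outerA_at_end, goB_at_end s n (i + m + 1) fuel2' (by omega)]
      intro hcontra
      have hh := (List.cons.injEq _ _ _ _ ▸ hcontra).1
      have hstr : String.ofList ((s.drop i).take (n - i)) = String.ofList ((s.drop i).take (i + m - i)) :=
        (Prod.ext_iff.mp hh).2
      have hlen := congrArg (fun t => t.toList.length) hstr
      simp only [String.toList_ofList, List.length_take, List.length_drop] at hlen
      omega
    · -- ordinary token: heads agree, tails differ by induction
      simp only [findA_outer, findB_go, if_pos hs, hj]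
      rw [hinner, if_neg (by omega)]
      have e : i + m - i = m := by omega
      rw [e]
      intro hcontra
      have htl := (List.cons.injEq _ _ _ _ ▸ hcontra).2
      exact ih fuel2' (i + m + 1) (by omega)
        (fun p hp hpn => hnone p (by omega) hpn) (by omega) (by omega) htl

-- ===== VERDICT (by name: the statement is the Claim_ definition above) =====
theorem find_all_words_spec : Claim_unchanged_find_all_words := by
  intro s _ hnd
  by_cases he : s.toList = []
  · simp [find_all_words, find_all_words_alt, he, findA_outer, findB_go]
  · have hx : ¬ ∀ p, p < s.toList.length → pvSuffIdent s.toList p = false :=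
      fun h => hnd ⟨he, h⟩
    push Not at hx
    obtain ⟨p, hpn, hps⟩ := hx
    unfold find_all_words find_all_words_alt
    exact outer_eq s.toList s.toList.length rfl _ _ 0
      ⟨p, Nat.zero_le _, hpn, by simpa using hps⟩ (by omega) (by omega)

theorem find_all_words_changed : Claim_changed_find_all_words := by
  unfold Claim_changed_find_all_words; decide

theorem find_all_words_tight : Claim_exact_find_all_words := by
  intro s _ hD
  obtain ⟨hne, hnone⟩ := hD
  have hn0 : 0 < s.toList.length := List.length_pos_of_ne_nil hne
  unfold find_all_words find_all_words_alt
  exact outer_ne s.toList s.toList.length rfl _ _ 0 hn0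
    (fun p _ hpn => hnone p hpn) (by omega) (by omega)
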